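-- pv_equiv track=rewrite | github.com/pypi-data/pypi-mirror-194 | packages/flightdata/flightdata-0.1.0.tar.gz/flightdata-0.1.0/flightdata/fields.py | _make_names
-- ===== SOURCE A (Python) =====
-- def _make_names(name, names, length):
--     _out_names = []
--     for i in range(0, length):
--         if i < len(names):
--             _out_names.append(name + '_' + names[i])
--         else:
--             _out_names.append(name + '_' + str(i))
--     return _out_names
-- ===== SOURCE B (Python) =====
-- def _make_names(name, names, length):
--     # Generate-then-patch: build the full list of numbered fallbacks first,
--     # then overwrite the leading entries in place with the provided names
--     # (zip truncates to whichever of range(length)/names is shorter).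
--     out = [name + '_' + str(i) for i in range(length)]
--     for i, n in zip(range(length), names):
--         out[i] = name + '_' + n
--     return out
-- ===== Notes on version B (the rewrite author's own statement) =====
-- stated objective: alternative
-- what changed: Generate-then-patch instead of a branching loop: B first materialises the full list of numbered fallbacks name+'_'+str(i) for the whole range, then destructively overwrites the leading slots with name+'_'+n by zipping range(length) with names, so no per-element conditional or length comparison exists.
import Mathlib
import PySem

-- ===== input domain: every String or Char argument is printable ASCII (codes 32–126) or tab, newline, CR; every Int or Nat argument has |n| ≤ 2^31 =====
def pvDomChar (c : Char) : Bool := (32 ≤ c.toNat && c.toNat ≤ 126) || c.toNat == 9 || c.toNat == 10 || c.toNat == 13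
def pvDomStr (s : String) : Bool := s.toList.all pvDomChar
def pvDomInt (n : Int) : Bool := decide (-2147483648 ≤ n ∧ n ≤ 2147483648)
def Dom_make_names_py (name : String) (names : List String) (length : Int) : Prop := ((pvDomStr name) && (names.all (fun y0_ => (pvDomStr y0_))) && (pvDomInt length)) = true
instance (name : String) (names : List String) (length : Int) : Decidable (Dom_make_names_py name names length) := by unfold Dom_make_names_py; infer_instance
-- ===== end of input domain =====

-- B is generate-then-patch: it first builds the full list of numbered fallback
-- entries for the whole range, then overwrites the leading slots in place with
-- the provided names via zip(range(length), names) (objective: alternative).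

-- ===== PORT A =====
def make_names_py (name : String) (names : List String) (length : Int) : List String :=
  (PySem.List.pyRange 0 length 1).foldl
    (fun out i =>
      if i < (names.length : Int) then
        out ++ [name ++ "_" ++ PySem.List.pyGetD names i ""]
      else
        out ++ [name ++ "_" ++ PySem.Int.toStr i]) []

-- ===== PORT B =====
def make_names_py_alt (name : String) (names : List String) (length : Int) : List String :=
  let out := (PySem.List.pyRange 0 length 1).map (fun i => name ++ "_" ++ PySem.Int.toStr i)
  ((PySem.List.pyRange 0 length 1).zip names).foldl
    (fun acc p => PySem.List.pySetD acc p.1 (name ++ "_" ++ p.2)) out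

-- ===== PRECONDITION & SPEC =====
def Spec_make_names_py (name : String) (names : List String) (length : Int) (out : List String) : Prop := out = make_names_py_alt name names length
instance (name : String) (names : List String) (length : Int) (out : List String) : Decidable (Spec_make_names_py name names length out) := by unfold Spec_make_names_py; infer_instance

-- ===== CLAIM (what is proved, stated in full; the proofs are below) =====
def Claim_equal_make_names_py : Prop := ∀ (name : String) (names : List String) (length : Int), Dom_make_names_py name names length → Spec_make_names_py name names length (make_names_py name names length)

-- ===== LEMMAS AND PROOFS =====

-- mapping xs[i] over range(0, t) is a map over the prefix take t (t ≤ len xs)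
theorem map_pyGetD_range_take (names : List String) (f : String → String) :
    ∀ (t : Nat), t ≤ names.length →
      (PySem.List.pyRange 0 (t : Int) 1).map (fun i => f (PySem.List.pyGetD names i "")) =
        (names.take t).map f := by
  intro t
  induction t with
  | zero => intro _; simp
  | succ t ih =>
    intro h
    have ht : (0:Int) ≤ (t : Int) := by positivity
    have hcast : ((t + 1 : Nat) : Int) = (t : Int) + 1 := by push_cast; ring
    rw [hcast, PySem.List.pyRange_one_succ_right ht, List.map_append, ih (by omega)]
    rw [List.take_succ_eq_append_getElem (by omega : t < names.length), List.map_append]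
    simp only [PySem.List.pyGetD_natCast, List.getD_eq_getElem?_getD, List.map_cons, List.map_nil,
      List.getElem?_eq_getElem (show t < names.length by omega), Option.getD_some]

-- A written as a single map with the branch, then split at k = min(len names, length)
theorem make_names_py_eq_map (name : String) (names : List String) (length : Int) :
    make_names_py name names length =
      (PySem.List.pyRange 0 length 1).map
        (fun i => if i < (names.length : Int) then name ++ "_" ++ PySem.List.pyGetD names i ""
                  else name ++ "_" ++ PySem.Int.toStr i) := by
  unfold make_names_py
  have : (fun (out : List String) (i : Int) =>
      if i < (names.length : Int) then out ++ [name ++ "_" ++ PySem.List.pyGetD names i ""]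
      else out ++ [name ++ "_" ++ PySem.Int.toStr i]) =
      (fun out i => out ++ [if i < (names.length : Int) then name ++ "_" ++ PySem.List.pyGetD names i ""
                            else name ++ "_" ++ PySem.Int.toStr i]) := by
    funext out i; split <;> rfl
  rw [this, PySem.List.foldl_append_singleton_eq_map, List.nil_append]

-- The patch loop: folding set over zip(range(s, len base), ns) rewrites the
-- window [s, s + min(len base - s, len ns)) of base and leaves the rest alone.
theorem patch_fold (f : String → String) :
    ∀ (ns : List String) (s : Nat) (base : List String), s ≤ base.length →
      ((PySem.List.pyRange (s : Int) (base.length : Int) 1).zip ns).foldl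
          (fun acc p => PySem.List.pySetD acc p.1 (f p.2)) base =
        base.take s ++ (ns.take (base.length - s)).map f ++ base.drop (s + ns.length) := by
  intro ns
  induction ns with
  | nil =>
    intro s base hs
    simp [List.take_append_drop]
  | cons x xs ih =>
    intro s base hs
    by_cases hlt : s < base.length
    · rw [PySem.List.pyRange_one_cons (by exact_mod_cast hlt), List.zip_cons_cons, List.foldl_cons]
      have hset : PySem.List.pySetD base (s : Int) (f x) = base.set s (f x) := by
        simp [PySem.List.pySetD_natCast]
      have hlen : (base.set s (f x)).length = base.length := by simp
      have hcast : ((s : Int) + 1) = ((s + 1 : Nat) : Int) := by push_cast; ring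
      rw [hset, hcast, ← hlen, ih (s + 1) (base.set s (f x)) (by omega)]
      rw [hlen]
      -- right chunk: the set index s is below the drop point
      rw [List.drop_set, if_pos (by omega : s < s + 1 + xs.length)]
      -- left chunk: take (s+1) of the set = take s ++ [f x]
      rw [List.take_set, List.take_succ_eq_append_getElem hlt,
        List.set_append, if_neg (by simp [Nat.min_eq_left (le_of_lt hlt)] : ¬ s < (base.take s).length)]
      have hz : s - (base.take s).length = 0 := by
        simp [Nat.min_eq_left (le_of_lt hlt)]
      rw [hz, List.set_cons_zero]
      have h3 : base.length - s = (base.length - (s + 1)) + 1 := by omega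
      rw [h3, List.take_succ_cons, List.map_cons]
      have h4 : s + (x :: xs).length = s + 1 + xs.length := by simp; omega
      rw [h4]
      simp [List.append_assoc]
    · have : (base.length : Int) ≤ (s : Int) := by exact_mod_cast (by omega : base.length ≤ s)
      rw [PySem.List.pyRange_one_eq_nil this]
      simp only [List.zip_nil_left, List.foldl_nil]
      have hse : s = base.length := by omega
      subst hse
      simp

-- base.drop m for base = (pyRange 0 length 1).map g, with (m:Int) ≤ length
theorem drop_map_pyRange (g : Int → String) (length : Int) (m : Nat)
    (hm : (m : Int) ≤ length) :
    ((PySem.List.pyRange 0 length 1).map g).drop m =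
      (PySem.List.pyRange (m : Int) length 1).map g := by
  rw [PySem.List.pyRange_one_append 0 (m : Int) length (by positivity) hm,
    List.map_append]
  exact List.drop_left' (by simp [PySem.List.length_pyRange_one])

-- ===== VERDICT (by name: the statement is the Claim_ definition above) =====
theorem make_names_py_spec : Claim_equal_make_names_py := by
  intro name names length _
  unfold Spec_make_names_py
  simp only [make_names_py_alt]
  rw [make_names_py_eq_map]
  by_cases hlen : length ≤ 0
  · rw [PySem.List.pyRange_one_eq_nil hlen]
    simp
  · push Not at hlen
    set n : Nat := length.toNat with hn
    have hnl : (n : Int) = length := by omega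
    set base : List String := (PySem.List.pyRange 0 length 1).map
      (fun i => name ++ "_" ++ PySem.Int.toStr i) with hbase
    have hbl : base.length = n := by simp [hbase, PySem.List.length_pyRange_one, hn]
    have hz : (PySem.List.pyRange 0 length 1).zip names =
        (PySem.List.pyRange ((0:Nat) : Int) (base.length : Int) 1).zip names := by
      rw [hbl, hnl]; norm_num
    rw [hz, patch_fold _ names 0 base (by omega)]
    rw [hbl]
    simp only [List.take_zero, List.nil_append, Nat.zero_add, Nat.sub_zero]
    set k : Nat := min n names.length with hk
    have hkc : names.take n = names.take k := by
      rcases Nat.le_total n names.length with h | h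
      · simp [hk, Nat.min_eq_left h]
      · rw [List.take_of_length_le h, hk, Nat.min_eq_right h, List.take_length]
    -- right part: drop names.length of base
    have hdrop : base.drop names.length =
        (PySem.List.pyRange (k : Int) length 1).map (fun i => name ++ "_" ++ PySem.Int.toStr i) := by
      rcases Nat.le_total names.length n with h | h
      · have hkk : k = names.length := by omega
        rw [hbase, hkk, drop_map_pyRange _ _ _ (by omega)]
      · have hkk : k = n := by omega
        rw [List.drop_of_length_le (by omega), hkk,
          PySem.List.pyRange_one_eq_nil (by omega : length ≤ (n : Int)), List.map_nil]
    rw [hdrop, hkc]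
    -- left part: A's branch map over pyRange 0 length splits at k
    rw [PySem.List.pyRange_one_append 0 (k : Int) length (by positivity) (by omega),
      List.map_append]
    congr 1
    · have hmap : (PySem.List.pyRange 0 (k : Int) 1).map
          (fun i => if i < (names.length : Int) then name ++ "_" ++ PySem.List.pyGetD names i ""
                    else name ++ "_" ++ PySem.Int.toStr i) =
          (PySem.List.pyRange 0 (k : Int) 1).map (fun i => name ++ "_" ++ PySem.List.pyGetD names i "") := by
        apply List.map_congr_left
        intro i hi
        rw [PySem.List.mem_pyRange_one] at hi
        rw [if_pos (by omega)]
      rw [hmap]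
      exact map_pyGetD_range_take names (fun n => name ++ "_" ++ n) k (by omega)
    · apply List.map_congr_left
      intro i hi
      rw [PySem.List.mem_pyRange_one] at hi
      rw [if_neg (by omega)]
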